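-- pv_equiv track=rewrite | github.com/Jsundstrom0223/should_it_be_hyphenated | entry_parser.py | is_inflection
-- ===== SOURCE A (Python) =====
-- def check_alt_forms(search_term_chars, field_value):
--     """Check whether an entry's va, inf, or stems field contains a form of the search term.
--
--     Arguments:
--     search_term: The search term used in the API call (an element of the compound).
--     field_value: The va, inf, or stems field of an entry.
--
--     Returns:
--     match: A boolean value. True means that the search term is a variant, inflection, or
--     stem of an open or hyphenated compound.
--     """
--     match = False
--     splitters = [" ", "-"]
--     for splitter in splitters:
--         if not match:
--             for i, _ in enumerate(search_term_chars):
--                 first_ele = "".join(search_term_chars[: i+1])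
--                 second_ele = "".join(search_term_chars[i + 1:])
--                 both = first_ele + splitter + second_ele
--                 if both == field_value:
--                     match = True
--
--     return match
--
-- def is_inflection(inflections, search_term):
--     """Check whether a dictionary entry's inf field contains the search term.
--
--     Arguments:
--     inflections: The ins (inflections) field of an entry.
--     search_term: The search term used in the API call (an element of the compound).
--
--     Returns:
--     term_is_inflection: A boolean. True means that the field contains the search term.
--     inf_label: The il field (the search term's relationship to the headword).
--     """
--     term_is_inflection = False
--     inf_label = None
--
--     for i in inflections:
--         inf = i.get('if')
--         if inf is None:
--             continue
--         if "*" in inf: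
--             inf = inf.replace("*", "")
--         if inf == search_term:
--             inf_label = i.get('il')
--             term_is_inflection = True
--             break
--
--         to_check = list(search_term)
--         term_is_inflection = check_alt_forms(to_check, inf)
--
--     return term_is_inflection, inf_label
-- ===== SOURCE B (Python) =====
-- def _is_split_form(inf, term):
--     """True iff inf equals term with a single ' ' or '-' inserted at position >= 1."""
--     if len(inf) != len(term) + 1:
--         return False
--     k = 0
--     while k < len(term) and inf[k] == term[k]:
--         k += 1
--     return k >= 1 and inf[k] in " -" and inf[k + 1:] == term[k:]
--
--
-- def is_inflection(inflections, search_term):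
--     term_is_inflection = False
--     for entry in inflections:
--         inf = entry.get('if')
--         if inf is None:
--             continue
--         if "*" in inf:
--             inf = inf.replace("*", "")
--         if inf == search_term:
--             return True, entry.get('il')
--         if _is_split_form(inf, search_term):
--             term_is_inflection = True
--     return term_is_inflection, None
-- ===== Notes on version B (the rewrite author's own statement) =====
-- stated objective: alternative
-- what changed: B replaces A's per-entry rebuild-of-every-split (two splitters x n splits, each rebuilding the whole string) by one linear common-prefix scan per entry, and keeps the alt-form flag once any entry matches instead of overwriting it each iteration.
-- intended difference: On inputs with no exact 'if' match where some non-last entry's 'if' value is the search term with a ' ' or '-' inserted but the last such value is not, A returns (False, None) because it overwrites the flag on every iteration so only the last entry counts, while B returns (True, None), the intended 'some entry contains an alt form' answer. — e.g. on is_inflection([[("if", "a b")], [("if", "xy")]], "ab"): A returns (false, none), B returns (true, none)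
import Mathlib
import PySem

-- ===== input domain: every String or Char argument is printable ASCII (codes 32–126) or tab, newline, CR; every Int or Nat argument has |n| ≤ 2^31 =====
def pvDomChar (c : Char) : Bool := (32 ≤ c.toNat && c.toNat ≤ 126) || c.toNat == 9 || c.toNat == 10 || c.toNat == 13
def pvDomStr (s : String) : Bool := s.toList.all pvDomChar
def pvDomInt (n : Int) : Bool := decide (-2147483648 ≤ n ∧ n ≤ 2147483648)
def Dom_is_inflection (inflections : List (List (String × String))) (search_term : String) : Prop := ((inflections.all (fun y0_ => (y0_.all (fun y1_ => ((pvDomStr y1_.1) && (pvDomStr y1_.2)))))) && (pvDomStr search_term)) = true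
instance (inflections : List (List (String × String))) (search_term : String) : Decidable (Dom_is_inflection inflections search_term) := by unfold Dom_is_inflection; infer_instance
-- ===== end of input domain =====

-- B replaces A's rebuild-every-split check by one linear common-prefix scan per entry and
-- keeps the alt-form flag once set; A instead overwrites the flag each iteration (see D_ below).

-- ===== PORT A =====

-- check_alt_forms: for each splitter, for each i, rebuild both halves and compare.
def checkAltForms (search_term_chars : List Char) (field_value : List Char) : Bool :=
  [[' '], ['-']].foldl
    (fun mtch splitter =>
      if mtch = false then
        (List.range search_term_chars.length).foldl
          (fun m i =>
            let first_ele := search_term_chars.take (i + 1)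
            let second_ele := search_term_chars.drop (i + 1)
            let both := first_ele ++ splitter ++ second_ele
            if both = field_value then true else m)
          mtch
      else mtch)
    false

-- the for-loop of A: state = (term_is_inflection, inf_label); break = early return.
def isInfGoA (search_term : String) :
    List (List (String × String)) → Bool → Option String → Bool × Option String
  | [], t, lbl => (t, lbl)
  | entry :: rest, t, lbl =>
    match (PySem.Dict.mk entry).get? "if" with
    | none => isInfGoA search_term rest t lbl          -- continue
    | some inf0 =>
      let inf := if PySem.Str.isIn "*" inf0 then PySem.Str.replace inf0 "*" "" else inf0
      if inf = search_term then (true, (PySem.Dict.mk entry).get? "il")   -- break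
      else isInfGoA search_term rest (checkAltForms search_term.toList inf.toList) lbl

def is_inflection (inflections : List (List (String × String))) (search_term : String) : Bool × Option String :=
  isInfGoA search_term inflections false none

-- ===== PORT B =====

-- the k-while-loop of Source B: length of the common prefix of term and inf.
def commonPrefixLen : List Char → List Char → Nat
  | t :: ts, x :: xs => if x = t then commonPrefixLen ts xs + 1 else 0
  | _, _ => 0

-- Source B's final line: k >= 1 and inf[k] in " -" and inf[k+1:] == term[k:]
def isSplitFormAux (infL termL : List Char) (k : Nat) : Bool :=
  decide (1 ≤ k) &&
    (match infL.drop k with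
     | c :: rest => (c = ' ' || c = '-') && decide (rest = termL.drop k)
     | [] => false)

-- _is_split_form: length must be len+1, then compute k by the while loop and test once.
def isSplitForm (infL : List Char) (termL : List Char) : Bool :=
  if infL.length ≠ termL.length + 1 then false
  else isSplitFormAux infL termL (commonPrefixLen termL infL)

-- the for-loop of Source B: state = term_is_inflection, sticky once true.
def isInfGoB (search_term : String) :
    List (List (String × String)) → Bool → Bool × Option String
  | [], t => (t, none)
  | entry :: rest, t =>
    match (PySem.Dict.mk entry).get? "if" with
    | none => isInfGoB search_term rest t
    | some inf0 =>
      let inf := if PySem.Str.isIn "*" inf0 then PySem.Str.replace inf0 "*" "" else inf0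
      if inf = search_term then (true, (PySem.Dict.mk entry).get? "il")
      else isInfGoB search_term rest
        (if isSplitForm inf.toList search_term.toList then true else t)

def is_inflection_alt (inflections : List (List (String × String))) (search_term : String) : Bool × Option String :=
  isInfGoB search_term inflections false

-- ===== PRECONDITION & SPEC =====

-- the normalized non-None 'if' values of the entries, in order (spec-level, no port code)
def infValues (l : List (List (String × String))) : List String :=
  l.filterMap fun e => ((PySem.Dict.mk e).get? "if").map fun s =>
    if PySem.Str.isIn "*" s then PySem.Str.replace s "*" "" else s

-- s is t with one ' ' or '-' inserted at a position >= 1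
def Variant (t s : String) : Prop :=
  s.toList.length = t.toList.length + 1 ∧ ∃ i < t.toList.length,
    s.toList = t.toList.insertIdx (i + 1) ' ' ∨ s.toList = t.toList.insertIdx (i + 1) '-' 

-- On inputs with no exact 'if' match where some non-last normalized 'if' value is the search
-- term with a ' ' or '-' inserted but the LAST one is not, A returns (false, none) because it
-- overwrites the flag each iteration so only the last entry counts, while B returns
-- (true, none), the intended "some entry contains an alt form" answer.
def D_is_inflection (inflections : List (List (String × String))) (search_term : String) : Prop :=
  (∃ s ∈ infValues inflections, Variant search_term s) ∧
  search_term ∉ infValues inflections ∧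
  ¬ Variant search_term ((infValues inflections).getLastD "")
instance (inflections : List (List (String × String))) (search_term : String) : Decidable (D_is_inflection inflections search_term) := by unfold D_is_inflection Variant; infer_instance

def Spec_is_inflection (inflections : List (List (String × String))) (search_term : String) (out : Bool × Option String) : Prop := ¬ D_is_inflection inflections search_term → out = is_inflection_alt inflections search_term
instance (inflections : List (List (String × String))) (search_term : String) (out : Bool × Option String) : Decidable (Spec_is_inflection inflections search_term out) := by unfold Spec_is_inflection; infer_instance

def pvDiffWitness_is_inflection : (List (List (String × String))) × String :=
  ([[("if", "a b")], [("if", "xy")]], "ab")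
def pvDiffWitnessOut_is_inflection : (Bool × Option String) × (Bool × Option String) :=
  ((false, none), (true, none))

-- ===== CLAIM =====
def Claim_unchanged_is_inflection : Prop := ∀ (inflections : List (List (String × String))) (search_term : String), Dom_is_inflection inflections search_term → Spec_is_inflection inflections search_term (is_inflection inflections search_term)
def Claim_changed_is_inflection : Prop := Dom_is_inflection (pvDiffWitness_is_inflection.1) (pvDiffWitness_is_inflection.2) ∧ D_is_inflection (pvDiffWitness_is_inflection.1) (pvDiffWitness_is_inflection.2) ∧ is_inflection (pvDiffWitness_is_inflection.1) (pvDiffWitness_is_inflection.2) = pvDiffWitnessOut_is_inflection.1 ∧ is_inflection_alt (pvDiffWitness_is_inflection.1) (pvDiffWitness_is_inflection.2) = pvDiffWitnessOut_is_inflection.2 ∧ pvDiffWitnessOut_is_inflection.1 ≠ pvDiffWitnessOut_is_inflection.2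
def Claim_exact_is_inflection : Prop := ∀ (inflections : List (List (String × String))) (search_term : String), Dom_is_inflection inflections search_term → D_is_inflection inflections search_term → is_inflection inflections search_term ≠ is_inflection_alt inflections search_term

-- ===== LEMMAS AND PROOFS =====

theorem foldl_set_true {α : Type} (p : α → Bool) (l : List α) (b : Bool) :
    l.foldl (fun m i => if p i = true then true else m) b = (b || l.any p) := by
  induction l generalizing b with
  | nil => simp
  | cons x xs ih =>
    rw [List.foldl_cons]
    cases hpx : p x
    · rw [if_neg Bool.false_ne_true, ih, List.any_cons, hpx]
      simp
    · rw [if_pos rfl, ih, List.any_cons, hpx]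
      simp

-- the existence form both checks match (j is the insertion position, = i+1 in A's loop)
def SplitAt (termL infL : List Char) (c : Char) (j : Nat) : Prop :=
  infL = termL.take j ++ c :: termL.drop j

theorem length_of_splitAt {termL infL : List Char} {c : Char} {j : Nat}
    (hj : j ≤ termL.length) (h : SplitAt termL infL c j) :
    infL.length = termL.length + 1 := by
  subst h
  simp only [List.length_append, List.length_take, List.length_cons, List.length_drop]
  omega

theorem splitAt_zero {ts is' : List Char} {x c : Char} :
    SplitAt ts (x :: is') c 0 ↔ x = c ∧ is' = ts := by
  simp [SplitAt]

theorem splitAt_succ {ts is' : List Char} {t x c : Char} {j : Nat} :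
    SplitAt (t :: ts) (x :: is') c (j + 1) ↔ x = t ∧ SplitAt ts is' c j := by
  simp [SplitAt]

theorem cpl_cons_eq (t : Char) (ts xs : List Char) :
    commonPrefixLen (t :: ts) (t :: xs) = commonPrefixLen ts xs + 1 := by
  simp [commonPrefixLen]

theorem cpl_cons_ne {t x : Char} (h : ¬ x = t) (ts xs : List Char) :
    commonPrefixLen (t :: ts) (x :: xs) = 0 := by
  simp [commonPrefixLen, h]

-- core of Source B's scan, insertion position ≥ 0 (used below the first matching head)
theorem ins0_iff : ∀ (ts is : List Char), is.length = ts.length + 1 →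
    (((match is.drop (commonPrefixLen ts is) with
       | c :: rest => (c = ' ' || c = '-') && decide (rest = ts.drop (commonPrefixLen ts is))
       | [] => false) : Bool) = true
     ↔ ∃ j ≤ ts.length, SplitAt ts is ' ' j ∨ SplitAt ts is '-' j) := by
  intro ts
  induction ts with
  | nil =>
    intro is hlen
    match is, hlen with
    | [c], _ =>
      simp only [show commonPrefixLen ([] : List Char) [c] = 0 from rfl, List.drop_zero,
        List.drop_nil, List.length_nil, Nat.le_zero]
      constructor
      · intro h
        simp only [Bool.and_eq_true, Bool.or_eq_true, decide_eq_true_eq] at h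
        rcases h with ⟨hc | hc, -⟩
        · exact ⟨0, rfl, Or.inl (splitAt_zero.mpr ⟨hc, rfl⟩)⟩
        · exact ⟨0, rfl, Or.inr (splitAt_zero.mpr ⟨hc, rfl⟩)⟩
      · rintro ⟨j, rfl, h | h⟩ <;> rw [splitAt_zero] at h <;> simp [h.1]
  | cons t ts' ih =>
    intro is hlen
    match is with
    | x :: is' =>
      have hlen' : is'.length = ts'.length + 1 := by simpa using hlen
      by_cases hx : x = t
      · subst hx
        rw [cpl_cons_eq, List.drop_succ_cons, List.drop_succ_cons, ih is' hlen']
        constructor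
        · rintro ⟨j0, hj0, h⟩
          refine ⟨j0 + 1, by simpa using hj0, ?_⟩
          rcases h with h | h
          · exact Or.inl (splitAt_succ.mpr ⟨rfl, h⟩)
          · exact Or.inr (splitAt_succ.mpr ⟨rfl, h⟩)
        · rintro ⟨j, hj, h⟩
          match j with
          | 0 =>
            rcases h with h | h <;> rw [splitAt_zero] at h
            · exact ⟨0, Nat.zero_le _, Or.inl (by simp [SplitAt, h.2, h.1])⟩
            · exact ⟨0, Nat.zero_le _, Or.inr (by simp [SplitAt, h.2, h.1])⟩
          | j' + 1 =>
            rcases h with h | h <;> rw [splitAt_succ] at h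
            · exact ⟨j', by simpa using hj, Or.inl h.2⟩
            · exact ⟨j', by simpa using hj, Or.inr h.2⟩
      · rw [cpl_cons_ne hx, List.drop_zero, List.drop_zero]
        constructor
        · intro h
          simp only [Bool.and_eq_true, Bool.or_eq_true, decide_eq_true_eq] at h
          rcases h with ⟨hc | hc, hrest⟩
          · exact ⟨0, Nat.zero_le _, Or.inl (splitAt_zero.mpr ⟨hc, hrest⟩)⟩
          · exact ⟨0, Nat.zero_le _, Or.inr (splitAt_zero.mpr ⟨hc, hrest⟩)⟩
        · rintro ⟨j, hj, h⟩
          match j with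
          | 0 =>
            rcases h with h | h <;> rw [splitAt_zero] at h <;>
              simp [h.1, h.2]
          | j' + 1 =>
            exfalso
            rcases h with h | h <;> rw [splitAt_succ] at h <;> exact hx h.1

-- Source B's whole check ⟺ 'infL is termL with one splitter inserted at position ≥ 1'
theorem isSplitForm_iff (termL infL : List Char) :
    isSplitForm infL termL = true ↔
      ∃ j, 1 ≤ j ∧ j ≤ termL.length ∧ (SplitAt termL infL ' ' j ∨ SplitAt termL infL '-' j) := by
  unfold isSplitForm
  by_cases hlen : infL.length = termL.length + 1
  · rw [if_neg (by omega)]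
    match termL, infL, hlen with
    | [], [c], _ =>
      constructor
      · intro h
        exact absurd h (by simp [isSplitFormAux,
          show commonPrefixLen ([] : List Char) [c] = 0 from rfl])
      · rintro ⟨j, hj1, hj2, -⟩
        simp only [List.length_nil] at hj2
        omega
    | t :: ts', x :: is', hlen =>
      have hlen' : is'.length = ts'.length + 1 := by simpa using hlen
      by_cases hx : x = t
      · subst hx
        rw [cpl_cons_eq]
        unfold isSplitFormAux
        rw [decide_eq_true (by omega : 1 ≤ commonPrefixLen ts' is' + 1), Bool.true_and]
        simp only [List.drop_succ_cons]
        refine Iff.trans (ins0_iff ts' is' hlen') ?_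
        constructor
        · rintro ⟨j0, hj0, h⟩
          refine ⟨j0 + 1, by omega, by simp only [List.length_cons]; omega, ?_⟩
          rcases h with h | h
          · exact Or.inl (splitAt_succ.mpr ⟨rfl, h⟩)
          · exact Or.inr (splitAt_succ.mpr ⟨rfl, h⟩)
        · rintro ⟨j, hj1, hj2, h⟩
          match j, hj1 with
          | j' + 1, _ =>
            simp only [List.length_cons] at hj2
            rcases h with h | h <;> rw [splitAt_succ] at h
            · exact ⟨j', by omega, Or.inl h.2⟩
            · exact ⟨j', by omega, Or.inr h.2⟩
      · rw [cpl_cons_ne hx]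
        unfold isSplitFormAux
        rw [decide_eq_false (by omega : ¬ (1 ≤ 0)), Bool.false_and]
        refine iff_of_false (by simp) ?_
        rintro ⟨j, hj1, hj2, h⟩
        match j, hj1 with
        | j' + 1, _ =>
          rcases h with h | h <;> rw [splitAt_succ] at h <;> exact hx h.1
  · rw [if_pos (by omega)]
    refine iff_of_false (by simp) ?_
    rintro ⟨j, hj1, hj2, h | h⟩ <;> exact hlen (length_of_splitAt hj2 h)

-- characterization of A's check_alt_forms: some split with some splitter equals the field
theorem caf_iff (termL infL : List Char) :
    checkAltForms termL infL = true ↔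
      (∃ i, i < termL.length ∧ termL.take (i + 1) ++ [' '] ++ termL.drop (i + 1) = infL)
      ∨ (∃ i, i < termL.length ∧ termL.take (i + 1) ++ ['-'] ++ termL.drop (i + 1) = infL) := by
  have inner : ∀ (sp : List Char) (b : Bool),
      (List.range termL.length).foldl
        (fun m i => if termL.take (i + 1) ++ sp ++ termL.drop (i + 1) = infL then true else m) b
      = (b || decide (∃ i, i < termL.length ∧ termL.take (i + 1) ++ sp ++ termL.drop (i + 1) = infL)) := by
    intro sp b
    have h := foldl_set_true
      (fun i => decide (termL.take (i + 1) ++ sp ++ termL.drop (i + 1) = infL))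
      (List.range termL.length) b
    simp only [decide_eq_true_eq] at h
    rw [h]
    congr 1
    rw [Bool.eq_iff_iff]
    simp
  unfold checkAltForms
  rw [List.foldl_cons, List.foldl_cons, List.foldl_nil]
  simp only [if_true]
  rw [inner [' '] false, Bool.false_or]
  by_cases hd1 : ∃ i, i < termL.length ∧ termL.take (i + 1) ++ [' '] ++ termL.drop (i + 1) = infL
  · rw [decide_eq_true hd1, if_neg (by simp)]
    exact iff_of_true rfl (Or.inl hd1)
  · rw [decide_eq_false hd1, if_pos rfl, inner ['-'] false, Bool.false_or]
    rw [decide_eq_true_eq]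
    constructor
    · exact Or.inr
    · rintro (h | h)
      · exact absurd h hd1
      · exact h

-- both per-string checks, and the spec predicate, agree
theorem splitAt_conv (termL infL : List Char) (c : Char) :
    (∃ i, i < termL.length ∧ termL.take (i + 1) ++ [c] ++ termL.drop (i + 1) = infL)
    ↔ ∃ j, 1 ≤ j ∧ j ≤ termL.length ∧ SplitAt termL infL c j := by
  constructor
  · rintro ⟨i, hi, h⟩
    refine ⟨i + 1, by omega, by omega, ?_⟩
    simp only [SplitAt]
    simpa using h.symm
  · rintro ⟨j, hj1, hj2, h⟩
    match j, hj1 with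
    | i + 1, _ =>
      refine ⟨i, by omega, ?_⟩
      simp only [SplitAt] at h
      simpa using h.symm

theorem checkAltForms_eq (termL infL : List Char) :
    checkAltForms termL infL = isSplitForm infL termL := by
  rw [Bool.eq_iff_iff, caf_iff, isSplitForm_iff]
  constructor
  · rintro (h | h)
    · exact ((splitAt_conv termL infL ' ').mp h).imp fun j hj => ⟨hj.1, hj.2.1, Or.inl hj.2.2⟩
    · exact ((splitAt_conv termL infL '-').mp h).imp fun j hj => ⟨hj.1, hj.2.1, Or.inr hj.2.2⟩
  · rintro ⟨j, hj1, hj2, h | h⟩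
    · exact Or.inl ((splitAt_conv termL infL ' ').mpr ⟨j, hj1, hj2, h⟩)
    · exact Or.inr ((splitAt_conv termL infL '-').mpr ⟨j, hj1, hj2, h⟩)

theorem insertIdx_take_drop (c : Char) : ∀ (l : List Char) (i : Nat), i ≤ l.length →
    l.insertIdx i c = l.take i ++ c :: l.drop i := by
  intro l
  induction l with
  | nil =>
    intro i h
    have : i = 0 := by simpa using h
    subst this; rfl
  | cons x xs ih =>
    intro i h
    cases i with
    | zero => rfl
    | succ j => simp [List.insertIdx_succ_cons, ih j (by simpa using h)]

theorem variant_iff (t s : String) :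
    Variant t s ↔ isSplitForm s.toList t.toList = true := by
  rw [isSplitForm_iff]
  unfold Variant
  constructor
  · rintro ⟨-, i, hi, h⟩
    refine ⟨i + 1, by omega, by omega, ?_⟩
    rw [insertIdx_take_drop ' ' t.toList (i + 1) (by omega),
        insertIdx_take_drop '-' t.toList (i + 1) (by omega)] at h
    exact h
  · rintro ⟨j, hj1, hj2, h⟩
    refine ⟨?_, ?_⟩
    · rcases h with h | h <;> exact length_of_splitAt hj2 h
    · match j, hj1 with
      | i + 1, _ =>
        refine ⟨i, by omega, ?_⟩
        rw [insertIdx_take_drop ' ' t.toList (i + 1) (by omega),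
            insertIdx_take_drop '-' t.toList (i + 1) (by omega)]
        exact h

-- infValues unfolding lemmas
theorem infValues_cons_none (entry : List (String × String)) (rest : List (List (String × String)))
    (hg : (PySem.Dict.mk entry).get? "if" = none) :
    infValues (entry :: rest) = infValues rest := by
  simp [infValues, hg]

theorem infValues_cons_some (entry : List (String × String)) (rest : List (List (String × String)))
    (inf0 : String) (hg : (PySem.Dict.mk entry).get? "if" = some inf0) :
    infValues (entry :: rest)
      = (if PySem.Str.isIn "*" inf0 then PySem.Str.replace inf0 "*" "" else inf0) :: infValues rest := by
  simp [infValues, hg]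

-- if the search term occurs exactly, both loops break identically whatever their state
theorem loops_eq_of_mem (term : String) :
    ∀ (xs : List (List (String × String))) (tA tB : Bool),
      term ∈ infValues xs →
      isInfGoA term xs tA none = isInfGoB term xs tB := by
  intro xs
  induction xs with
  | nil => intro _ _ h; simp [infValues] at h
  | cons entry rest ih =>
    intro tA tB hmem
    cases hg : (PySem.Dict.mk entry).get? "if" with
    | none =>
      simp only [isInfGoA, isInfGoB, hg]
      apply ih
      rw [infValues_cons_none entry rest hg] at hmem
      exact hmem
    | some inf0 =>
      simp only [isInfGoA, isInfGoB, hg]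
      by_cases he : (if PySem.Str.isIn "*" inf0 then PySem.Str.replace inf0 "*" "" else inf0) = term
      · rw [if_pos he, if_pos he]
      · rw [if_neg he, if_neg he]
        apply ih
        rw [infValues_cons_some entry rest inf0 hg] at hmem
        rcases List.mem_cons.mp hmem with h | h
        · exact absurd h.symm he
        · exact h

-- if the search term never occurs, A returns the check of the LAST seen value
theorem loopA_no_mem (term : String) :
    ∀ (xs : List (List (String × String))) (t : Bool),
      term ∉ infValues xs →
      isInfGoA term xs t none
        = ((infValues xs).foldl (fun _ s => checkAltForms term.toList s.toList) t, none) := by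
  intro xs
  induction xs with
  | nil => intro t _; simp [infValues, isInfGoA]
  | cons entry rest ih =>
    intro t hmem
    cases hg : (PySem.Dict.mk entry).get? "if" with
    | none =>
      rw [infValues_cons_none entry rest hg] at hmem ⊢
      simp only [isInfGoA, hg]
      exact ih t hmem
    | some inf0 =>
      rw [infValues_cons_some entry rest inf0 hg] at hmem ⊢
      have h1 : (if PySem.Str.isIn "*" inf0 then PySem.Str.replace inf0 "*" "" else inf0) ≠ term :=
        fun h => hmem (h ▸ List.mem_cons_self)
      have h2 : term ∉ infValues rest := fun h => hmem (List.mem_cons_of_mem _ h)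
      simp only [isInfGoA, hg, if_neg h1]
      rw [ih _ h2, List.foldl_cons]

-- if the search term never occurs, B returns whether ANY seen value passes the check
theorem loopB_no_mem (term : String) :
    ∀ (xs : List (List (String × String))) (t : Bool),
      term ∉ infValues xs →
      isInfGoB term xs t = (t || (infValues xs).any (fun s => isSplitForm s.toList term.toList), none) := by
  intro xs
  induction xs with
  | nil => intro t _; simp [infValues, isInfGoB]
  | cons entry rest ih =>
    intro t hmem
    cases hg : (PySem.Dict.mk entry).get? "if" with
    | none =>
      rw [infValues_cons_none entry rest hg] at hmem ⊢
      simp only [isInfGoB, hg]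
      exact ih t hmem
    | some inf0 =>
      rw [infValues_cons_some entry rest inf0 hg] at hmem ⊢
      have h1 : (if PySem.Str.isIn "*" inf0 then PySem.Str.replace inf0 "*" "" else inf0) ≠ term :=
        fun h => hmem (h ▸ List.mem_cons_self)
      have h2 : term ∉ infValues rest := fun h => hmem (List.mem_cons_of_mem _ h)
      simp only [isInfGoB, hg, if_neg h1]
      rw [ih _ h2, List.any_cons]
      rcases Bool.dichotomy (isSplitForm
          (if PySem.Str.isIn "*" inf0 then PySem.Str.replace inf0 "*" "" else inf0).toList
          term.toList) with hc | hc <;> rw [hc] <;> cases t <;> rfl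

-- a constant-overwriting fold computes the function of the last element
theorem foldl_last {α β : Type} (f : α → β) (t : β) :
    ∀ L : List α, L.foldl (fun _ s => f s) t = L.getLast?.elim t f := by
  intro L
  induction L generalizing t with
  | nil => rfl
  | cons x xs ih =>
    rw [List.foldl_cons, ih (f x)]
    cases hx : xs.getLast? with
    | none =>
      have : xs = [] := List.getLast?_eq_none_iff.mp hx
      subst this
      simp
    | some l =>
      simp [List.getLast?_cons, hx]

-- ===== VERDICT =====
theorem is_inflection_spec : Claim_unchanged_is_inflection := by
  intro inflections search_term _ hnd
  show is_inflection inflections search_term = is_inflection_alt inflections search_term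
  unfold is_inflection is_inflection_alt
  by_cases hmem : search_term ∈ infValues inflections
  · exact loops_eq_of_mem search_term inflections false false hmem
  · rw [loopA_no_mem search_term inflections false hmem,
        loopB_no_mem search_term inflections false hmem,
        foldl_last, Bool.false_or]
    unfold D_is_inflection at hnd
    rw [not_and, not_and] at hnd
    cases hL : (infValues inflections).getLast? with
    | none =>
      have : infValues inflections = [] := List.getLast?_eq_none_iff.mp hL
      rw [this]
      simp
    | some l =>
      have hlmem : l ∈ infValues inflections := List.mem_of_getLast? hL
      simp only [Option.elim_some, checkAltForms_eq]
      by_cases hv : isSplitForm l.toList search_term.toList = true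
      · have : (infValues inflections).any (fun s => isSplitForm s.toList search_term.toList) = true :=
          List.any_eq_true.mpr ⟨l, hlmem, hv⟩
        rw [this, hv]
      · have hlastv : ¬ Variant search_term ((infValues inflections).getLastD "") := by
          rw [List.getLastD_eq_getLast?, hL, Option.getD_some, variant_iff]
          exact hv
        have hnoany : (infValues inflections).any (fun s => isSplitForm s.toList search_term.toList) = false := by
          rw [Bool.eq_false_iff]
          intro h
          rcases List.any_eq_true.mp h with ⟨s, hs, hss⟩
          exact (hnd ⟨s, hs, (variant_iff search_term s).mpr hss⟩ hmem) hlastv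
        rw [hnoany, Bool.eq_false_iff.mpr hv]

set_option maxRecDepth 8192 in
theorem is_inflection_changed : Claim_changed_is_inflection := by
  unfold Claim_changed_is_inflection; decide

theorem is_inflection_tight : Claim_exact_is_inflection := by
  intro inflections search_term _ hd
  unfold D_is_inflection at hd
  obtain ⟨hany, hmem, hlast⟩ := hd
  unfold is_inflection is_inflection_alt
  rw [loopA_no_mem search_term inflections false hmem,
      loopB_no_mem search_term inflections false hmem,
      foldl_last, Bool.false_or]
  have hne : infValues inflections ≠ [] := by
    rcases hany with ⟨s, hs, -⟩
    exact List.ne_nil_of_mem hs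
  cases hL : (infValues inflections).getLast? with
  | none => exact absurd (List.getLast?_eq_none_iff.mp hL) hne
  | some l =>
    have hlv : isSplitForm l.toList search_term.toList = false := by
      rw [List.getLastD_eq_getLast?, hL, Option.getD_some, variant_iff] at hlast
      exact Bool.eq_false_iff.mpr hlast
    have hanyB : (infValues inflections).any (fun s => isSplitForm s.toList search_term.toList) = true := by
      rcases hany with ⟨s, hs, hss⟩
      exact List.any_eq_true.mpr ⟨s, hs, (variant_iff search_term s).mp hss⟩
    simp only [Option.elim_some, checkAltForms_eq]
    rw [hlv, hanyB]
    simp
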